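-- pv_equiv track=rewrite | github.com/Deltares/HYDROLIB-core | hydrolib/tools/ext_old_to_new/utils.py | find_temperature_salinity_in_quantities
-- ===== SOURCE A (Python) =====
-- from collections import OrderedDict
-- from typing import Any, Dict, List, Type, Union
--
-- def find_temperature_salinity_in_quantities(strings: List[str]) -> Dict[str, int]:
--     """
--     Searches for keywords "temperature" and "salinity" in a list of strings
--     and returns a dictionary with associated values.
--
--     Args:
--         strings (List[str]): A list of strings to search.
--
--     Returns:
--         Dict[str, int]: A dictionary with keys as "temperature" or "salinity"
--                         and values 3 and 4 respectively.
--
--      Examples: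
--         >>> find_temperature_salinity_in_quantities(["temperature", "Salinity"])
--         OrderedDict({"temperaturedelta": 3, "salinitydelta": 4})
--
--         >>> find_temperature_salinity_in_quantities(["Temperature"])
--         OrderedDict({"temperaturedelta": 3})
--
--         >>> find_temperature_salinity_in_quantities(["Salinity"])
--         OrderedDict({"salinitydelta": 3})
--
--         >>> find_temperature_salinity_in_quantities(["tracers"])
--         OrderedDict()
--
--         >>> find_temperature_salinity_in_quantities([])
--         OrderedDict()
--     """
--     result = OrderedDict()
--
--     if any("temperature" in string.lower() for string in strings):
--         result["temperaturedelta"] = 3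
--     if any("salinity" in string.lower() for string in strings):
--         result["salinitydelta"] = (
--             result.get("temperaturedelta", 2) + 1
--         )  # Default temperature value is 2
--
--     return result
-- ===== SOURCE B (Python) =====
-- from collections import OrderedDict
-- from typing import Dict, List
--
-- # value table indexed by mask = temp_bit + 2*sal_bit
-- _TABLE = [
--     (),
--     (("temperaturedelta", 3),),
--     (("salinitydelta", 3),),
--     (("temperaturedelta", 3), ("salinitydelta", 4)),
-- ]
--
--
-- def find_temperature_salinity_in_quantities(strings: List[str]) -> Dict[str, int]:
--     # One combined text: keywords contain no '\n', so a match in the joined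
--     # text cannot cross a boundary and is exactly a match in some element.
--     text = "\n".join(s.lower() for s in strings)
--     mask = ("temperature" in text) + 2 * ("salinity" in text)
--     return OrderedDict(_TABLE[mask])
-- ===== Notes on version B (the rewrite author's own statement) =====
-- stated objective: alternative
-- what changed: Instead of A's two any() scans over the list plus incremental dict construction via .get, B joins all lowered strings into one newline-separated text, performs a single substring search per keyword on that text (sound because the keywords contain no newline, so a match cannot cross a boundary), and returns a dict taken from a 4-entry literal table indexed by a bitmask.
import Mathlib
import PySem

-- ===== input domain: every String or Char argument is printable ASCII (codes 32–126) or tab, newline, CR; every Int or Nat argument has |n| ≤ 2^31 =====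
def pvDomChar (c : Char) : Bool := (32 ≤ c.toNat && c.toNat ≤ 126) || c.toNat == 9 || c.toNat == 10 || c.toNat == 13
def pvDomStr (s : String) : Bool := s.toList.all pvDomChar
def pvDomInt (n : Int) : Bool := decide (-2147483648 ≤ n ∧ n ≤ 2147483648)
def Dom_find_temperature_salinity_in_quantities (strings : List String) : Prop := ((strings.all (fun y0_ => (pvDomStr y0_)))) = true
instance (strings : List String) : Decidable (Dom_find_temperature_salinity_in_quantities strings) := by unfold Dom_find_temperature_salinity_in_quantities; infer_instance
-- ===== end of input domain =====

-- B joins the lowered strings with '\n' and does one substring search per keyword on the combined text, then indexes a 4-entry table by a bitmask (alternative algorithm, same cost).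


-- ===== PORT A =====
def find_temperature_salinity_in_quantities (strings : List String) : List (String × Int) :=
  let result : PySem.Dict String Int := PySem.Dict.empty
  let result :=
    if strings.any (fun s => PySem.Str.isIn "temperature" (PySem.Str.lower s)) then
      result.insert "temperaturedelta" 3
    else result
  let result :=
    if strings.any (fun s => PySem.Str.isIn "salinity" (PySem.Str.lower s)) then
      result.insert "salinitydelta" (result.getD "temperaturedelta" 2 + 1)
    else result
  result.items

-- ===== PORT B =====
-- the literal value table _TABLE, indexed by mask = temp_bit + 2*sal_bit
def fts_table : List (List (String × Int)) :=
  [[], [("temperaturedelta", 3)], [("salinitydelta", 3)],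
   [("temperaturedelta", 3), ("salinitydelta", 4)]]

def find_temperature_salinity_in_quantities_alt (strings : List String) : List (String × Int) :=
  let text := PySem.Str.join "\n" (strings.map PySem.Str.lower)
  let mask : Nat :=
    (if PySem.Str.isIn "temperature" text then 1 else 0) +
    2 * (if PySem.Str.isIn "salinity" text then 1 else 0)
  -- _TABLE[mask]: mask is always 0..3, so the lookup never fails; getD [] only totalises it
  ((PySem.List.pyGet? fts_table (mask : Int)).getD [])

-- ===== PRECONDITION & SPEC =====
def Spec_find_temperature_salinity_in_quantities (strings : List String) (out : List (String × Int)) : Prop := out = find_temperature_salinity_in_quantities_alt strings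
instance (strings : List String) (out : List (String × Int)) : Decidable (Spec_find_temperature_salinity_in_quantities strings out) := by unfold Spec_find_temperature_salinity_in_quantities; infer_instance

-- ===== CLAIM (what is proved, stated in full; the proofs are below) =====
def Claim_equal_find_temperature_salinity_in_quantities : Prop := ∀ (strings : List String), Dom_find_temperature_salinity_in_quantities strings → Spec_find_temperature_salinity_in_quantities strings (find_temperature_salinity_in_quantities strings)

-- ===== LEMMAS AND PROOFS =====

-- a prefix of xs ++ d :: ys that avoids d is a prefix of xs
theorem fts_prefix_split {α : Type} {cs xs ys : List α} {d : α}
    (hd : d ∉ cs) (h : cs <+: xs ++ d :: ys) : cs <+: xs := by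
  induction cs generalizing xs with
  | nil => exact List.nil_prefix
  | cons c cs' ih =>
    cases xs with
    | nil =>
      rw [List.nil_append, List.cons_prefix_cons] at h
      exact absurd (h.1 ▸ List.mem_cons_self) hd
    | cons x xs' =>
      rw [List.cons_append, List.cons_prefix_cons] at h
      exact List.cons_prefix_cons.mpr
        ⟨h.1, ih (fun hm => hd (List.mem_cons_of_mem _ hm)) h.2⟩

-- an infix of xs ++ d :: ys that avoids d lies in xs or in ys
theorem fts_infix_split {α : Type} {cs xs ys : List α} {d : α}
    (hd : d ∉ cs) (h : cs <:+: xs ++ d :: ys) : cs <:+: xs ∨ cs <:+: ys := by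
  induction xs with
  | nil =>
    rw [List.nil_append, List.infix_cons_iff] at h
    rcases h with hp | h2
    · have : cs <+: ([] : List α) :=
        fts_prefix_split hd (by simpa using hp)
      left
      simp [List.prefix_nil.mp this]
    · exact Or.inr h2
  | cons x xs' ih =>
    rw [List.cons_append, List.infix_cons_iff] at h
    rcases h with hp | h2
    · exact Or.inl
        (fts_prefix_split (xs := x :: xs') hd (by simpa [List.cons_append] using hp)).isInfix
    · rcases ih h2 with h | h
      · exact Or.inl (List.infix_cons h)
      · exact Or.inr h

-- a nonempty separator-free needle is an infix of the intercalation iff of some part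
theorem fts_infix_intercalate {α : Type} {cs : List α} {d : α}
    (hd : d ∉ cs) (hne : cs ≠ []) (parts : List (List α)) :
    cs <:+: List.intercalate [d] parts ↔ ∃ p ∈ parts, cs <:+: p := by
  induction parts with
  | nil =>
    simp [List.intercalate, hne]
  | cons p rest ih =>
    cases rest with
    | nil => simp [List.intercalate]
    | cons q rest' =>
      have hjoin : List.intercalate [d] (p :: q :: rest')
          = p ++ d :: List.intercalate [d] (q :: rest') := by
        simp [List.intercalate]
      rw [hjoin]
      constructor
      · intro h
        rcases fts_infix_split hd h with h | h
        · exact ⟨p, List.mem_cons_self, h⟩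
        · rcases ih.mp h with ⟨r, hr, hcr⟩
          exact ⟨r, List.mem_cons_of_mem _ hr, hcr⟩
      · rintro ⟨r, hr, hcr⟩
        rcases List.mem_cons.mp hr with rfl | hr'
        · exact hcr.trans (List.prefix_append r _).isInfix
        · refine (ih.mpr ⟨r, hr', hcr⟩).trans ?_
          have hsuf : List.intercalate [d] (q :: rest')
              <:+ p ++ d :: List.intercalate [d] (q :: rest') := by
            simpa using List.suffix_append (p ++ [d]) (List.intercalate [d] (q :: rest'))
          exact hsuf.isInfix
  -- note: fts_infix_intercalate generalizes over any element type; used at α = Char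

-- B's one search over the joined text equals A's any() over the elements
theorem fts_isIn_join (needle : String) (hd : '\n' ∉ needle.toList)
    (hne : needle.toList ≠ []) (strings : List String) :
    PySem.Str.isIn needle (PySem.Str.join "\n" (strings.map PySem.Str.lower))
      = strings.any (fun s => PySem.Str.isIn needle (PySem.Str.lower s)) := by
  rcases h : strings.any (fun s => PySem.Str.isIn needle (PySem.Str.lower s)) with _ | _
  · rw [Bool.eq_false_iff]
    intro hIn
    rw [PySem.Str.isIn_iff_infix, PySem.Str.toList_join] at hIn
    have : needle.toList <:+: List.intercalate ['\n']
        ((strings.map PySem.Str.lower).map String.toList) := by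
      simpa [PySem.Chars.join] using hIn
    rcases (fts_infix_intercalate hd hne _).mp this with ⟨p, hp, hcp⟩
    rcases List.mem_map.mp hp with ⟨t, ht, rfl⟩
    rcases List.mem_map.mp ht with ⟨s, hs, rfl⟩
    have hTrue : strings.any (fun s => PySem.Str.isIn needle (PySem.Str.lower s)) = true :=
      List.any_eq_true.mpr ⟨s, hs, (PySem.Str.isIn_iff_infix _ _).mpr hcp⟩
    rw [h] at hTrue
    exact absurd hTrue (by decide)
  · rcases List.any_eq_true.mp h with ⟨s, hs, hsIn⟩
    rw [PySem.Str.isIn_iff_infix] at hsIn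
    rw [PySem.Str.isIn_iff_infix, PySem.Str.toList_join]
    have hmem : (PySem.Str.lower s).toList ∈
        ((strings.map PySem.Str.lower).map String.toList) := by
      exact List.mem_map_of_mem (List.mem_map_of_mem hs)
    have : needle.toList <:+: List.intercalate ['\n']
        ((strings.map PySem.Str.lower).map String.toList) :=
      (fts_infix_intercalate hd hne _).mpr ⟨_, hmem, hsIn⟩
    simpa [PySem.Chars.join] using this

theorem find_temperature_salinity_in_quantities_eq (strings : List String) :
    find_temperature_salinity_in_quantities strings =
      find_temperature_salinity_in_quantities_alt strings := by
  have hT := fts_isIn_join "temperature" (by decide) (by decide) strings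
  have hS := fts_isIn_join "salinity" (by decide) (by decide) strings
  simp only [find_temperature_salinity_in_quantities,
    find_temperature_salinity_in_quantities_alt]
  rw [hT, hS]
  cases h1 : strings.any (fun s => PySem.Str.isIn "temperature" (PySem.Str.lower s)) <;>
    cases h2 : strings.any (fun s => PySem.Str.isIn "salinity" (PySem.Str.lower s)) <;>
      simp [fts_table, PySem.Dict.empty, PySem.Dict.insert, PySem.Dict.getD,
        PySem.Dict.get?, PySem.Dict.contains, PySem.List.pyGet?, PySem.List.pyIdx?]

-- ===== VERDICT (by name: the statement is the Claim_ definition above) =====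
theorem find_temperature_salinity_in_quantities_spec : Claim_equal_find_temperature_salinity_in_quantities := by
  intro strings _
  exact find_temperature_salinity_in_quantities_eq strings
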